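-- pv_equiv track=rewrite | github.com/drathke924/userscripts | Advent_Of_Code_2020/day6.py | part_two
-- ===== SOURCE A (Python) =====
-- def part_two(data_in):
--     result = 0
--     for group in data_in:
--         answers = set(group[0])
--         for person in group:
--             answers = answers.intersection(set(person))
--         result += len(answers)
--     return result
-- ===== SOURCE B (Python) =====
-- def part_two(data_in):
--     total = 0
--     for group in data_in:
--         tally = {}
--         for person in group:
--             for ch in set(person):
--                 tally[ch] = tally.get(ch, 0) + 1
--         total += sum(1 for c in tally.values() if c == len(group))
--     return total
-- ===== Notes on version B (the rewrite author's own statement) =====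
-- stated objective: alternative
-- what changed: Replaces the running set-intersection per group by a single frequency tally (dict counter over each person's distinct letters); a letter counts iff its tally equals the group size.
import Mathlib
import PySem

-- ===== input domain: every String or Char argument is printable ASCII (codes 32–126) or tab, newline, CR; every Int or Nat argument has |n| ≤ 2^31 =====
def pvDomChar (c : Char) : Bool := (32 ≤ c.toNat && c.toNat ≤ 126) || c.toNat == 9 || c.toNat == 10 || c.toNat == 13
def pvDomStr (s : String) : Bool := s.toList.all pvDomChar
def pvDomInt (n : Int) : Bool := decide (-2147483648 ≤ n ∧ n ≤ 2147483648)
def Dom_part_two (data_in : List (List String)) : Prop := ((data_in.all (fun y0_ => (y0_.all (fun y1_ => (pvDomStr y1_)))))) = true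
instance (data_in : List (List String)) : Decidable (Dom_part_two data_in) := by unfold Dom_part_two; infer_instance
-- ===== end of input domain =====

-- B replaces the per-group running set intersection by one frequency tally over each
-- person's distinct letters (a letter counts iff its tally equals the group size);
-- alternative decomposition, same asymptotic cost.

-- ===== PORT A =====
def part_two (data_in : List (List String)) : Int :=
  data_in.foldl (fun result group =>
    match group with
    | [] => result  -- Python raises IndexError here (group[0]); excluded by Pre_part_two
    | g0 :: _ =>
      result + ((group.foldl (fun answers person =>
          PySem.Set.inter answers (PySem.Set.ofList person.toList))
          (PySem.Set.ofList g0.toList)).length : Int)) 0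

-- ===== PORT B =====
def part_two_alt (data_in : List (List String)) : Int :=
  data_in.foldl (fun total group =>
    let tally : PySem.Dict Char Int := group.foldl (fun t person =>
      (PySem.Set.ofList person.toList).foldl (fun t ch => t.insert ch (t.getD ch 0 + 1)) t)
      PySem.Dict.empty
    total + ((tally.values.countP (fun c => c == (group.length : Int)) : Int))) 0

-- ===== PRECONDITION & SPEC =====
-- Pre_ excludes exactly the inputs containing an empty group, where A raises IndexError.
def Pre_part_two (data_in : List (List String)) : Prop :=
  (data_in.all (fun g => !g.isEmpty)) = true
instance (data_in : List (List String)) : Decidable (Pre_part_two data_in) := by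
  unfold Pre_part_two; infer_instance

def pvWitness_part_two : List (List String) := [["ab", "b"], ["xy"]]

def Spec_part_two (data_in : List (List String)) (out : Int) : Prop := out = part_two_alt data_in
instance (data_in : List (List String)) (out : Int) : Decidable (Spec_part_two data_in out) := by unfold Spec_part_two; infer_instance

-- ===== CLAIM (what is proved, stated in full; the proofs are below) =====
def Claim_equal_part_two : Prop := ∀ (data_in : List (List String)), Dom_part_two data_in → Pre_part_two data_in → Spec_part_two data_in (part_two data_in)

-- ===== LEMMAS AND PROOFS =====

-- per-person character set
def pvS (p : String) : PySem.Set Char := PySem.Set.ofList p.toList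

-- A's inner loop is a filter of the starting set
lemma pvInterFold (l : List String) (s : List Char) :
    l.foldl (fun a p => PySem.Set.inter a (pvS p)) s
      = s.filter (fun c => l.all (fun p => (pvS p).contains c)) := by
  induction l generalizing s with
  | nil => simp
  | cons p t ih =>
      rw [List.foldl_cons,
        show PySem.Set.inter s (pvS p) = s.filter (fun c => (pvS p).contains c) from rfl,
        ih, List.filter_filter]
      simp only [List.all_cons]
      exact List.filter_congr (fun a _ => by rw [Bool.and_comm])

-- flat.count c counts the persons whose letter set contains c
lemma pvCountFlat (group : List String) (c : Char) :
    (group.flatMap (fun p => (pvS p : List Char))).count c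
      = group.countP (fun p => (pvS p).contains c) := by
  induction group with
  | nil => simp
  | cons p t ih =>
      simp only [List.flatMap_cons, List.count_append, ih, List.countP_cons]
      have hnd : (pvS p : List Char).Nodup := PySem.Set.nodup_ofList _
      by_cases h : c ∈ (pvS p : List Char)
      · have : (pvS p : List Char).count c = 1 := List.count_eq_one_of_mem hnd h
        simp [this, PySem.Set.contains, h]
        omega
      · have : (pvS p : List Char).count c = 0 := List.count_eq_zero_of_not_mem h
        simp [this, PySem.Set.contains, h]

-- per-group: A's intersection size equals B's tally count
lemma pvGroup (g0 : String) (rest : List String) :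
    (((g0 :: rest).foldl (fun a p => PySem.Set.inter a (pvS p)) (pvS g0)).length : Int)
      = (((g0 :: rest).foldl (fun t person =>
            ((pvS person : List Char)).foldl (fun t ch => t.insert ch (t.getD ch 0 + 1)) t)
            PySem.Dict.empty).values.countP
          (fun c => c == ((g0 :: rest).length : Int)) : Int) := by
  set group : List String := g0 :: rest with hg
  set flat : List Char := group.flatMap (fun p => (pvS p : List Char)) with hflat
  -- B side: the nested fold is Counter(flat)
  have hB : group.foldl (fun t person =>
        ((pvS person : List Char)).foldl (fun t ch => t.insert ch (t.getD ch 0 + 1)) t)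
        PySem.Dict.empty = PySem.Dict.counter flat := by
    rw [hflat, ← PySem.Dict.foldl_insert_getD_add_one_eq_counter, List.foldl_flatMap]
  rw [hB, pvInterFold]
  -- values of the counter
  have hv : (PySem.Dict.counter flat).values
      = (PySem.Set.ofList flat).map (fun k => ((flat.count k : Int))) := by
    show ((PySem.Dict.counter flat).items.map (·.2))
        = (PySem.Set.ofList flat).map (fun k => ((flat.count k : Int)))
    rw [PySem.Dict.items_counter, List.map_map]
    rfl
  rw [hv, List.countP_map]
  -- both sides count the same letters: both lists are nodup and agree on membership under the predicate
  have hpred : ∀ c : Char, ((flat.count c : Int) == ((group.length : Nat) : Int)) = true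
      ↔ ∀ p ∈ group, c ∈ (pvS p : List Char) := by
    intro c
    simp only [beq_iff_eq, Int.natCast_inj]
    rw [pvCountFlat]
    constructor
    · intro h p hp
      have := List.countP_eq_length.mp h p hp
      simpa using this
    · intro h
      apply List.countP_eq_length.mpr
      intro p hp; simpa using h p hp
  have hlen : ((pvS g0 : List Char).filter (fun c => group.all (fun p => (pvS p).contains c))).length
      = List.countP ((fun c => c == ((group.length : Nat) : Int)) ∘ fun k => ((flat.count k : Int)))
          (PySem.Set.ofList flat) := by
    rw [List.countP_eq_length_filter]
    apply List.Perm.length_eq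
    refine (List.perm_ext_iff_of_nodup
      (List.Nodup.filter _ (PySem.Set.nodup_ofList g0.toList))
      (List.Nodup.filter _ (PySem.Set.nodup_ofList flat))).mpr ?_
    intro c
    simp only [List.mem_filter, Function.comp, List.all_eq_true, PySem.Set.contains,
      List.contains_iff_mem, PySem.Set.mem_ofList, hpred c]
    constructor
    · rintro ⟨hc, hall⟩
      refine ⟨?_, hall⟩
      rw [hflat]
      simp only [List.mem_flatMap]
      exact ⟨g0, by simp [hg], (PySem.Set.mem_ofList _ _).mpr hc⟩
    · rintro ⟨-, hall⟩
      exact ⟨(PySem.Set.mem_ofList _ _).mp (hall g0 (by simp [hg])), hall⟩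
  exact_mod_cast hlen

-- equal accumulators propagate through the two folds
lemma pvMain (l : List (List String)) (a : Int)
    (hpre : (l.all (fun g => !g.isEmpty)) = true) :
    l.foldl (fun result group =>
      match group with
      | [] => result
      | g0 :: _ =>
        result + ((group.foldl (fun answers person =>
            PySem.Set.inter answers (PySem.Set.ofList person.toList))
            (PySem.Set.ofList g0.toList)).length : Int)) a
    = l.foldl (fun total group =>
        let tally : PySem.Dict Char Int := group.foldl (fun t person =>
          (PySem.Set.ofList person.toList).foldl (fun t ch => t.insert ch (t.getD ch 0 + 1)) t)
          PySem.Dict.empty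
        total + ((tally.values.countP (fun c => c == (group.length : Int)) : Int))) a := by
  induction l generalizing a with
  | nil => rfl
  | cons g t ih =>
      simp only [List.all_cons, Bool.and_eq_true] at hpre
      obtain ⟨hg, ht⟩ := hpre
      match g with
      | [] => simp at hg
      | g0 :: rest =>
          simp only [List.foldl_cons]
          rw [ih _ ht]
          congr 1
          exact congrArg (a + ·) (pvGroup g0 rest)

-- ===== VERDICT (by name: the statement is the Claim_ definition above) =====
theorem part_two_spec : Claim_equal_part_two := by
  intro data_in _ hpre
  unfold Spec_part_two part_two part_two_alt
  exact pvMain data_in 0 hpre
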